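-- pv_equiv track=rewrite | github.com/PLeVasseur/opencode-project-agents | fls/glossary-term-map.py | parse_section_blocks
-- ===== SOURCE A (Python) =====
-- def parse_section_blocks(content_lines: list[str]) -> tuple[list[str] | None, list[str] | None]:
--     sections: dict[str, list[str] | None] = {"glossary": None, "chapter": None}
--     current = None
--     buffer: list[str] = []
--
--     for line in content_lines:
--         stripped = line.strip()
--         if stripped in (":glossary:", ":chapter:") and line.startswith(":"):
--             if current is not None:
--                 sections[current] = dedent_block(buffer)
--             current = stripped.strip(":")
--             buffer = []
--             continue
--
--         if current is None:
--             continue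
--
--         buffer.append(line)
--
--     if current is not None:
--         sections[current] = dedent_block(buffer)
--
--     return sections["glossary"], sections["chapter"]
--
-- def dedent_block(lines: list[str]) -> list[str]:
--     indents = [len(line) - len(line.lstrip(" ")) for line in lines if line.strip()]
--     indent = min(indents) if indents else 0
--     return [line[indent:] if len(line) >= indent else "" for line in lines]
-- ===== SOURCE B (Python) =====
-- def dedent_block(lines):
--     indents = [len(line) - len(line.lstrip(" ")) for line in lines if line.strip()]
--     indent = min(indents) if indents else 0
--     return [line[indent:] if len(line) >= indent else "" for line in lines]
--
--
-- def parse_section_blocks(content_lines):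
--     def is_marker(line):
--         return line.startswith(":") and line.strip() in (":glossary:", ":chapter:")
--
--     n = len(content_lines)
--     # skip the prologue before the first marker
--     i = 0
--     while i < n and not is_marker(content_lines[i]):
--         i += 1
--     # split the remainder into (name, body) blocks: each block runs from a marker
--     # line up to (excluding) the next marker line
--     blocks = []
--     while i < n:
--         j = i + 1
--         while j < n and not is_marker(content_lines[j]):
--             j += 1
--         blocks.append((content_lines[i].strip().strip(":"), content_lines[i + 1:j]))
--         i = j
--     sections = {"glossary": None, "chapter": None}
--     for name, body in blocks:
--         sections[name] = dedent_block(body)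
--     return sections["glossary"], sections["chapter"]
-- ===== Notes on version B (the rewrite author's own statement) =====
-- stated objective: alternative
-- what changed: A is a one-pass state machine carrying a current-section name and a growing buffer; B first drops the prologue before the first marker, then recursively splits the remainder into (name, body) blocks (body = lines up to the next marker) and inserts each dedented block into the sections dict.
import Mathlib
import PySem

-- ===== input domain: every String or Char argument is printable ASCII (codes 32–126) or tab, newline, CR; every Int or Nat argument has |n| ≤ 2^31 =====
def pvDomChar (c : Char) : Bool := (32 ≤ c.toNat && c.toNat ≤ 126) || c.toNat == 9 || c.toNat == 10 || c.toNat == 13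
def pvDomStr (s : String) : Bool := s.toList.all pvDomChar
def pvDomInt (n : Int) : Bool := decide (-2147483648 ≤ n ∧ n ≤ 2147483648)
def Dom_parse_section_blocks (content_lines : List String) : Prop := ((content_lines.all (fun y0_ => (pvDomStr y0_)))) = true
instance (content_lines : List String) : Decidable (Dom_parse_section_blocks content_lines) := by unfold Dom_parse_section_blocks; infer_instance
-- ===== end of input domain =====

-- B replaces A's one-pass current/buffer state machine by a recursive split of the input
-- into (name, body) blocks; same O(n) cost ("alternative", not claimed faster).

-- ===== PORT A =====
-- shared helper: both Pythons contain the identical dedent_block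
def dedent_block (lines : List String) : List String :=
  let indents : List Nat :=
    (lines.filter (fun line => !(PySem.Str.strip line == ""))).map
      -- len(line) - len(line.lstrip(" ")) = number of leading space characters (exact)
      (fun line => (line.toList.takeWhile (fun c => c == ' ')).length)
  let indent : Nat := (PySem.List.min? indents (fun x => x)).getD 0
  lines.map (fun line =>
    if PySem.Str.len line ≥ indent then PySem.Str.slice line (some (indent : Int)) none else "")

def stepA (st : PySem.Dict String (Option (List String)) × Option String × List String)
    (line : String) : PySem.Dict String (Option (List String)) × Option String × List String :=
  let stripped := PySem.Str.strip line
  if (stripped == ":glossary:" || stripped == ":chapter:") && PySem.Str.startswith line ":" then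
    let d := match st.2.1 with
      | some c => st.1.insert c (some (dedent_block st.2.2))
      | none => st.1
    (d, some (PySem.Str.stripChars stripped ":"), [])
  else
    match st.2.1 with
    | none => st
    | some _ => (st.1, st.2.1, st.2.2 ++ [line])

def parse_section_blocks (content_lines : List String) :
    Option (List String) × Option (List String) :=
  let d0 : PySem.Dict String (Option (List String)) :=
    (PySem.Dict.empty.insert "glossary" none).insert "chapter" none
  let st := content_lines.foldl stepA (d0, none, [])
  let sections := match st.2.1 with
    | some c => st.1.insert c (some (dedent_block st.2.2))
    | none => st.1
  ((sections.get? "glossary").getD none, (sections.get? "chapter").getD none)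

-- ===== PORT B =====
def is_markerB (line : String) : Bool :=
  PySem.Str.startswith line ":" &&
    (PySem.Str.strip line == ":glossary:" || PySem.Str.strip line == ":chapter:")

def split_blocksB : List String → List (String × List String)
  | [] => []
  | h :: t =>
    let body := t.takeWhile (fun line => !is_markerB line)
    (PySem.Str.stripChars (PySem.Str.strip h) ":", body) :: split_blocksB (t.drop body.length)
termination_by lines => lines.length
decreasing_by simp

def parse_section_blocks_alt (content_lines : List String) :
    Option (List String) × Option (List String) :=
  -- i = number of prologue lines before the first marker; tail = content_lines[i:]
  let i := (content_lines.takeWhile (fun line => !is_markerB line)).length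
  let tail := content_lines.drop i
  let d0 : PySem.Dict String (Option (List String)) :=
    (PySem.Dict.empty.insert "glossary" none).insert "chapter" none
  let sections := (split_blocksB tail).foldl
    (fun d nb => d.insert nb.1 (some (dedent_block nb.2))) d0
  ((sections.get? "glossary").getD none, (sections.get? "chapter").getD none)

-- ===== PRECONDITION & SPEC =====
def Spec_parse_section_blocks (content_lines : List String) (out : Option (List String) × Option (List String)) : Prop := out = parse_section_blocks_alt content_lines
instance (content_lines : List String) (out : Option (List String) × Option (List String)) : Decidable (Spec_parse_section_blocks content_lines out) := by unfold Spec_parse_section_blocks; infer_instance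

-- ===== CLAIM (what is proved, stated in full; the proofs are below) =====
def Claim_equal_parse_section_blocks : Prop := ∀ (content_lines : List String), Dom_parse_section_blocks content_lines → Spec_parse_section_blocks content_lines (parse_section_blocks content_lines)

-- ===== LEMMAS AND PROOFS =====

-- A's marker test equals B's (the two conjuncts are swapped)
theorem markerA_eq (line : String) :
    ((PySem.Str.strip line == ":glossary:" || PySem.Str.strip line == ":chapter:") &&
      PySem.Str.startswith line ":") = is_markerB line := by
  simp [is_markerB, Bool.and_comm]

-- finish of A's fold state
def finishA (st : PySem.Dict String (Option (List String)) × Option String × List String) :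
    PySem.Dict String (Option (List String)) :=
  match st.2.1 with
  | some c => st.1.insert c (some (dedent_block st.2.2))
  | none => st.1

-- B's block fold
def foldB (d : PySem.Dict String (Option (List String))) (bs : List (String × List String)) :
    PySem.Dict String (Option (List String)) :=
  bs.foldl (fun d nb => d.insert nb.1 (some (dedent_block nb.2))) d

theorem stepA_marker (st : PySem.Dict String (Option (List String)) × Option String × List String)
    (line : String) (h : is_markerB line = true) :
    stepA st line =
      (finishA st, some (PySem.Str.stripChars (PySem.Str.strip line) ":"), []) := by
  cases st with
  | mk d p =>
    cases p with
    | mk cur buf =>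
      simp only [stepA, markerA_eq, h, if_true, finishA]

theorem stepA_nonmarker_some (d : PySem.Dict String (Option (List String))) (c : String)
    (buf : List String) (line : String) (h : is_markerB line = false) :
    stepA (d, some c, buf) line = (d, some c, buf ++ [line]) := by
  simp only [stepA, markerA_eq, h, Bool.false_eq_true, if_false]

theorem stepA_nonmarker_none (d : PySem.Dict String (Option (List String)))
    (buf : List String) (line : String) (h : is_markerB line = false) :
    stepA (d, none, buf) line = (d, none, buf) := by
  simp only [stepA, markerA_eq, h, Bool.false_eq_true, if_false]

theorem split_blocksB_nil : split_blocksB [] = [] := by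
  rw [split_blocksB]

theorem split_blocksB_cons (h : String) (t : List String) :
    split_blocksB (h :: t) =
      (PySem.Str.stripChars (PySem.Str.strip h) ":",
        t.takeWhile (fun line => !is_markerB line)) ::
        split_blocksB (t.drop (t.takeWhile (fun line => !is_markerB line)).length) := by
  rw [split_blocksB]

theorem drop_length_takeWhile (p : String → Bool) (t : List String) :
    t.drop (t.takeWhile p).length = t.dropWhile p := by
  induction t with
  | nil => rfl
  | cons h t ih =>
    by_cases hp : p h = true <;>
      simp [hp, ih]

-- main invariant: from a state with an open section, A's remaining fold finishes to
-- B's fold over the blocks of the remaining lines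
theorem mainA (lines : List String) :
    ∀ (d : PySem.Dict String (Option (List String))) (c : String) (buf : List String),
    finishA (lines.foldl stepA (d, some c, buf)) =
      foldB (d.insert c (some (dedent_block
          (buf ++ lines.takeWhile (fun line => !is_markerB line)))))
        (split_blocksB (lines.dropWhile (fun line => !is_markerB line))) := by
  induction lines with
  | nil => intro d c buf; simp [finishA, foldB, split_blocksB_nil]
  | cons l t ih =>
    intro d c buf
    by_cases hm : is_markerB l = true
    · rw [List.foldl_cons, stepA_marker _ _ hm, ih]
      have hd : (l :: t).dropWhile (fun line => !is_markerB line) = l :: t := by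
        rw [List.dropWhile_cons]; simp [hm]
      have htk : (l :: t).takeWhile (fun line => !is_markerB line) = [] := by
        rw [List.takeWhile_cons]; simp [hm]
      rw [hd, htk, split_blocksB_cons, drop_length_takeWhile]
      simp [foldB, finishA]
    · have hb : is_markerB l = false := by simpa using hm
      rw [List.foldl_cons, stepA_nonmarker_some _ _ _ _ hb, ih]
      rw [List.takeWhile_cons, List.dropWhile_cons]
      simp [hb]

theorem prologueA (lines : List String) (d : PySem.Dict String (Option (List String))) :
    lines.foldl stepA (d, none, ([] : List String)) =
      (lines.dropWhile (fun line => !is_markerB line)).foldl stepA (d, none, []) := by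
  induction lines with
  | nil => rfl
  | cons l t ih =>
    by_cases hm : is_markerB l = true
    · rw [List.dropWhile_cons]; simp [hm]
    · have hb : is_markerB l = false := by simpa using hm
      rw [List.foldl_cons, stepA_nonmarker_none _ _ _ hb, List.dropWhile_cons]
      simp [hb, ih]

theorem dicts_eq (content_lines : List String)
    (d0 : PySem.Dict String (Option (List String))) :
    finishA (content_lines.foldl stepA (d0, none, [])) =
      foldB d0 (split_blocksB (content_lines.dropWhile (fun line => !is_markerB line))) := by
  rw [prologueA]
  cases hrest : content_lines.dropWhile (fun line => !is_markerB line) with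
  | nil => simp [finishA, foldB, split_blocksB_nil]
  | cons m t =>
    have hm : is_markerB m = true := by
      have := List.head_dropWhile_not (p := fun line => !is_markerB line) (l := content_lines)
      rw [hrest] at this; simpa using this (by simp)
    rw [List.foldl_cons, stepA_marker _ _ hm, mainA, split_blocksB_cons, drop_length_takeWhile]
    simp [foldB, finishA]

-- ===== VERDICT (by name: the statement is the Claim_ definition above) =====
theorem parse_section_blocks_spec : Claim_equal_parse_section_blocks := by
  intro content_lines _
  simp only [Spec_parse_section_blocks, parse_section_blocks, parse_section_blocks_alt,
    drop_length_takeWhile]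
  have h := dicts_eq content_lines ((PySem.Dict.empty.insert "glossary" none).insert "chapter" none)
  simp only [finishA, foldB] at h
  simp only [h]
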